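-- pv_equiv track=rewrite | github.com/uditanshutomar/genec | genec/core/evolutionary_miner.py | _normalize_generic_type
-- ===== SOURCE A (Python) =====
-- def _normalize_generic_type(type_str: str) -> str:
--     """Normalize generic type by removing spaces after commas in generics."""
--     # Map<String, Integer> -> Map<String,Integer>
--     # List<String> -> List<String> (no change)
--     result = []
--     inside_generics = 0
--     i = 0
--
--     while i < len(type_str):
--         char = type_str[i]
--
--         if char == "<":
--             inside_generics += 1
--             result.append(char)
--         elif char == ">":
--             inside_generics -= 1
--             result.append(char)
--         elif char == "," and inside_generics > 0:
--             result.append(char)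
--             # Skip any following spaces
--             i += 1
--             while i < len(type_str) and type_str[i].isspace():
--                 i += 1
--             i -= 1  # Back up one since we'll increment at the end of loop
--         else:
--             result.append(char)
--
--         i += 1
--
--     return "".join(result)
-- ===== SOURCE B (Python) =====
-- def _normalize_generic_type(type_str: str) -> str:
--     """Normalize generic type by removing spaces after commas in generics."""
--     result = []
--     depth = 0
--     for char in type_str:
--         if char == "<":
--             depth += 1
--             result.append(char)
--         elif char == ">":
--             depth -= 1
--             result.append(char)
--         elif char.isspace() and depth > 0 and result and result[-1] == ",":
--             pass  # drop whitespace in a run following a comma inside generics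
--         else:
--             result.append(char)
--     return "".join(result)
-- ===== Notes on version B (the rewrite author's own statement) =====
-- stated objective: simpler
-- what changed: Replaced A's index-driven while loop with an inner whitespace-skipping loop and index back-up by a single for-pass that drops a whitespace character iff depth is positive and the last kept character is a comma.
import Mathlib
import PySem

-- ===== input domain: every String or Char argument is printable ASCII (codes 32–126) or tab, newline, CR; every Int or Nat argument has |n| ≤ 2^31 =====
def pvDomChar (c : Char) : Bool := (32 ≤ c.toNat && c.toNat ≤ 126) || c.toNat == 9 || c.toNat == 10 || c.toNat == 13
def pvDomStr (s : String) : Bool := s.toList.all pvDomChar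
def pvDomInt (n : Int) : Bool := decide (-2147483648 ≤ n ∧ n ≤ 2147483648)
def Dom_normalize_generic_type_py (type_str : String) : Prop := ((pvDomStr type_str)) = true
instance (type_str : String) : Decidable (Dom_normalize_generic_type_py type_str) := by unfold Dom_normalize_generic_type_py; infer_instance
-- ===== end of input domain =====

-- B replaces A's index-based scan with inner space-skipping while-loop by a single
-- look-back pass: drop a whitespace char iff depth > 0 and the last kept char is ','
-- (objective: simpler decomposition, same cost).

-- ===== PORT A =====
-- the inner `while i < len(type_str) and type_str[i].isspace(): i += 1` loop
def pySkipSpacesA : List Char → List Char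
  | [] => []
  | c :: rest => if PySem.Chars.isspace c then pySkipSpacesA rest else c :: rest

theorem pySkipSpacesA_length_le (l : List Char) : (pySkipSpacesA l).length ≤ l.length := by
  induction l with
  | nil => simp [pySkipSpacesA]
  | cons c rest ih =>
    simp only [pySkipSpacesA]
    split
    · exact Nat.le_succ_of_le ih
    · simp

-- A's outer while loop over index i, state (remaining chars, inside_generics, result)
def goA : List Char → Int → List Char → List Char
  | [], _, acc => acc
  | c :: rest, g, acc =>
    if c = '<' then goA rest (g + 1) (acc ++ [c])
    else if c = '>' then goA rest (g - 1) (acc ++ [c])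
    else if c = ',' ∧ 0 < g then goA (pySkipSpacesA rest) g (acc ++ [c])
    else goA rest g (acc ++ [c])
termination_by l _ _ => l.length
decreasing_by
  · simp
  · simp
  · exact Nat.lt_succ_of_le (pySkipSpacesA_length_le rest)
  · simp

def normalize_generic_type_py (type_str : String) : String :=
  String.mk (goA type_str.toList 0 [])

-- ===== PORT B =====
-- single for-loop, state (depth, result); drops whitespace after a kept ','
def goB : List Char → Int → List Char → List Char
  | [], _, acc => acc
  | c :: rest, g, acc =>
    if c = '<' then goB rest (g + 1) (acc ++ [c])
    else if c = '>' then goB rest (g - 1) (acc ++ [c])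
    else if PySem.Chars.isspace c ∧ 0 < g ∧ acc.getLast? = some ',' then goB rest g acc
    else goB rest g (acc ++ [c])

def normalize_generic_type_py_alt (type_str : String) : String :=
  String.mk (goB type_str.toList 0 [])

-- ===== PRECONDITION & SPEC =====
def Spec_normalize_generic_type_py (type_str : String) (out : String) : Prop := out = normalize_generic_type_py_alt type_str
instance (type_str : String) (out : String) : Decidable (Spec_normalize_generic_type_py type_str out) := by unfold Spec_normalize_generic_type_py; infer_instance

-- ===== CLAIM (what is proved, stated in full; the proofs are below) =====
def Claim_equal_normalize_generic_type_py : Prop := ∀ (type_str : String), Dom_normalize_generic_type_py type_str → Spec_normalize_generic_type_py type_str (normalize_generic_type_py type_str)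

-- ===== LEMMAS AND PROOFS =====

theorem isspace_ne_lt {c : Char} (h : PySem.Chars.isspace c = true) : ¬ c = '<' := by
  intro hc; subst hc; exact absurd h (by decide)

theorem isspace_ne_gt {c : Char} (h : PySem.Chars.isspace c = true) : ¬ c = '>' := by
  intro hc; subst hc; exact absurd h (by decide)

theorem isspace_ne_comma {c : Char} (h : PySem.Chars.isspace c = true) : ¬ c = ',' := by
  intro hc; subst hc; exact absurd h (by decide)

-- the head of pySkipSpacesA is never whitespace
theorem pySkipSpacesA_head (l : List Char) (c : Char)
    (h : (pySkipSpacesA l).head? = some c) : PySem.Chars.isspace c = false := by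
  induction l with
  | nil => simp [pySkipSpacesA] at h
  | cons d rest ih =>
    simp only [pySkipSpacesA] at h
    by_cases hd : PySem.Chars.isspace d
    · rw [if_pos hd] at h; exact ih h
    · rw [if_neg hd] at h
      simp at h
      rw [← h]
      simpa using hd

-- B drops a whole run of whitespace following a kept ',' inside generics
theorem goB_skip (l : List Char) (g : Int) (acc : List Char)
    (hg : 0 < g) (hl : acc.getLast? = some ',') :
    goB l g acc = goB (pySkipSpacesA l) g acc := by
  induction l with
  | nil => simp [pySkipSpacesA]
  | cons c rest ih =>
    by_cases hc : PySem.Chars.isspace c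
    · have h1 : ¬ c = '<' := isspace_ne_lt hc
      have h2 : ¬ c = '>' := isspace_ne_gt hc
      simp only [goB, pySkipSpacesA, if_neg h1, if_neg h2, if_pos hc,
        if_pos (And.intro hc (And.intro hg hl))]
      exact ih
    · simp [pySkipSpacesA, if_neg hc]

-- main invariant: the two loops agree whenever (depth > 0 and result ends with ',')
-- implies the next char is not whitespace
theorem goA_eq_goB (n : Nat) : ∀ (l : List Char) (g : Int) (acc : List Char),
    l.length ≤ n →
    (0 < g → acc.getLast? = some ',' →
      ∀ c, l.head? = some c → PySem.Chars.isspace c = false) →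
    goA l g acc = goB l g acc := by
  induction n with
  | zero =>
    intro l g acc hlen _
    have : l = [] := List.length_eq_zero_iff.mp (Nat.le_zero.mp hlen)
    subst this; simp [goA, goB]
  | succ n ih =>
    intro l g acc hlen H
    match l with
    | [] => simp [goA, goB]
    | c :: rest =>
      have hrest : rest.length ≤ n := Nat.le_of_succ_le_succ hlen
      by_cases h1 : c = '<'
      · simp only [goA, goB, if_pos h1]
        apply ih rest _ _ hrest
        intro _ hlast
        rw [List.getLast?_concat] at hlast
        simp [h1] at hlast
      · by_cases h2 : c = '>'
        · simp only [goA, goB, if_neg h1, if_pos h2]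
          apply ih rest _ _ hrest
          intro _ hlast
          rw [List.getLast?_concat] at hlast
          simp [h2] at hlast
        · by_cases h3 : c = ',' ∧ 0 < g
          · -- A skips the spaces; B drops them one by one (goB_skip)
            have hcs : PySem.Chars.isspace c = false := by
              rw [h3.1]; decide
            simp only [goA, goB, if_neg h1, if_neg h2, if_pos h3]
            rw [if_neg (by simp [hcs])]
            rw [goB_skip rest g (acc ++ [c]) h3.2 (by rw [List.getLast?_concat, h3.1])]
            apply ih _ _ _ (Nat.le_trans (pySkipSpacesA_length_le rest) hrest)
            intro _ _ c' hc'
            exact pySkipSpacesA_head rest c' hc'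
          · by_cases hsp : PySem.Chars.isspace c
            · -- whitespace, but by H the last kept char is not ',' (or depth ≤ 0)
              have hnb : ¬ (PySem.Chars.isspace c ∧ 0 < g ∧ acc.getLast? = some ',') := by
                rintro ⟨_, hg, hlast⟩
                have := H hg hlast c rfl
                rw [hsp] at this; exact absurd this (by simp)
              simp only [goA, goB, if_neg h1, if_neg h2, if_neg h3, if_neg hnb]
              apply ih rest _ _ hrest
              intro _ hlast
              rw [List.getLast?_concat] at hlast
              have : c = ',' := by simpa using hlast
              exact absurd this (isspace_ne_comma hsp)
            · -- ordinary character, both append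
              have hnb : ¬ (PySem.Chars.isspace c = true ∧ 0 < g ∧ acc.getLast? = some ',') :=
                fun h => hsp h.1
              simp only [goA, goB, if_neg h1, if_neg h2, if_neg h3, if_neg hnb]
              apply ih rest _ _ hrest
              intro hg hlast
              rw [List.getLast?_concat] at hlast
              have : c = ',' := by simpa using hlast
              exact absurd (And.intro this hg) h3

-- ===== VERDICT (by name: the statement is the Claim_ definition above) =====
theorem normalize_generic_type_py_spec : Claim_equal_normalize_generic_type_py := by
  intro type_str _
  unfold Spec_normalize_generic_type_py normalize_generic_type_py normalize_generic_type_py_alt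
  rw [goA_eq_goB type_str.toList.length type_str.toList 0 [] (Nat.le_refl _)
    (by intro hg; exact absurd hg (by norm_num))]
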